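-- pv_equiv track=rewrite | github.com/Jason-Wang313/ERRORQUAKE | src/errorquake/generate.py | _batch_sizes
-- ===== SOURCE A (Python) =====
-- def _batch_sizes(total: int, batch_size: int = 25) -> list[int]:
--     sizes: list[int] = []
--     remaining = total
--     while remaining > 0:
--         size = min(batch_size, remaining)
--         sizes.append(size)
--         remaining -= size
--     return sizes
-- ===== SOURCE B (Python) =====
-- def _batch_sizes(total: int, batch_size: int = 25) -> list[int]:
--     if total <= 0:
--         return []
--     full, rem = divmod(total, batch_size)
--     sizes = [batch_size] * full
--     if rem:
--         sizes.append(rem)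
--     return sizes
-- ===== Notes on version B (the rewrite author's own statement) =====
-- stated objective: simpler
-- what changed: Replaces the subtract-and-append while loop with a closed-form construction via divmod: full copies of batch_size plus the remainder if nonzero.
import Mathlib
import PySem

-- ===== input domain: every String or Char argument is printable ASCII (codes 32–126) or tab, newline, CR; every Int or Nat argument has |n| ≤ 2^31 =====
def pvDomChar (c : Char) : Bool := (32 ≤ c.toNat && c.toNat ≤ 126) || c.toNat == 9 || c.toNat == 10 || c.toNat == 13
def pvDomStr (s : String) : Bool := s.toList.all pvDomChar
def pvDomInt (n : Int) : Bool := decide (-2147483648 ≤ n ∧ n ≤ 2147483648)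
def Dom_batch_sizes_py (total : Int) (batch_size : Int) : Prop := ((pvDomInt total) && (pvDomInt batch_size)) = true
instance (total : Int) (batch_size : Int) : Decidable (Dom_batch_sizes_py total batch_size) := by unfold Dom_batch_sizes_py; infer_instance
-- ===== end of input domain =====

-- B replaces A's subtract-and-append while loop by a closed-form divmod construction (simpler).


-- ===== PORT A =====
-- the while loop of A; the inner `0 < size` guard only makes the recursion total:
-- when it fails (batch_size ≤ 0 with remaining > 0) the Python loop diverges, which Pre_ excludes.
def batchLoopA (batch_size : Int) (remaining : Int) (acc : List Int) : List Int :=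
  if h : 0 < remaining then
    let size := min batch_size remaining
    if hs : 0 < size then
      batchLoopA batch_size (remaining - size) (acc ++ [size])
    else acc
  else acc
termination_by remaining.toNat
decreasing_by
  have hle : min batch_size remaining ≤ remaining := min_le_right _ _
  omega

def batch_sizes_py (total : Int) (batch_size : Int) : List Int :=
  batchLoopA batch_size total []

-- ===== PORT B =====
-- divmod? is none exactly where Python's divmod raises (batch_size = 0); Pre_ excludes that with total > 0.
def batch_sizes_py_alt (total : Int) (batch_size : Int) : List Int :=
  if total ≤ 0 then []
  else
    match PySem.Int.divmod? total batch_size with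
    | none => []
    | some (full, rem) =>
      List.replicate full.toNat batch_size ++ (if rem ≠ 0 then [rem] else [])

-- ===== PRECONDITION & SPEC =====
-- Pre_ excludes total > 0 with batch_size ≤ 0: there A's while loop never terminates
-- (size = min(batch_size, remaining) ≤ 0, so remaining never decreases).
def Pre_batch_sizes_py (total : Int) (batch_size : Int) : Prop := total ≤ 0 ∨ 1 ≤ batch_size
instance (total : Int) (batch_size : Int) : Decidable (Pre_batch_sizes_py total batch_size) := by
  unfold Pre_batch_sizes_py; infer_instance

def pvWitness_batch_sizes_py : Int × Int := (7, 3)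

def Spec_batch_sizes_py (total : Int) (batch_size : Int) (out : List Int) : Prop := out = batch_sizes_py_alt total batch_size
instance (total : Int) (batch_size : Int) (out : List Int) : Decidable (Spec_batch_sizes_py total batch_size out) := by unfold Spec_batch_sizes_py; infer_instance

-- ===== CLAIM (what is proved, stated in full; the proofs are below) =====
def Claim_equal_batch_sizes_py : Prop := ∀ (total : Int) (batch_size : Int), Dom_batch_sizes_py total batch_size → Pre_batch_sizes_py total batch_size → Spec_batch_sizes_py total batch_size (batch_sizes_py total batch_size)

-- ===== LEMMAS AND PROOFS =====

-- loop invariant: with a positive batch size, the loop appends ⌊r/bs⌋ copies of bs and then the remainder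
theorem batchLoopA_closed (bs : Int) (hbs : 1 ≤ bs) :
    ∀ (n : Nat) (r : Int), 0 ≤ r → r.toNat ≤ n → ∀ (acc : List Int),
      batchLoopA bs r acc =
        acc ++ List.replicate (r / bs).toNat bs ++ (if r % bs ≠ 0 then [r % bs] else []) := by
  intro n
  induction n with
  | zero =>
      intro r hr hn acc
      have : r = 0 := by omega
      subst this
      rw [batchLoopA]
      simp
  | succ n ih =>
      intro r hr hn acc
      by_cases hpos : 0 < r
      · rw [batchLoopA]
        by_cases hge : bs ≤ r
        · -- full batch: min bs r = bs
          have hmin : min bs r = bs := min_eq_left hge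
          have hrec := ih (r - bs) (by omega) (by omega) (acc ++ [bs])
          simp only [hpos, hmin, dif_pos, dif_pos (by omega : (0:Int) < bs)]
          rw [hrec]
          have hdiv : r / bs = (r - bs) / bs + 1 := by
            have h1 := Int.add_mul_ediv_right (r - bs) 1 (by omega : bs ≠ 0)
            have h2 : r - bs + 1 * bs = r := by ring
            rw [h2] at h1
            omega
          have hmod : r % bs = (r - bs) % bs := by
            conv_lhs => rw [show r = (r - bs) + 1 * bs by ring]
            exact Int.add_mul_emod_self_right ..
          have hdnn : 0 ≤ (r - bs) / bs := Int.ediv_nonneg (by omega) (by omega)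
          have htn : (r / bs).toNat = ((r - bs) / bs).toNat + 1 := by omega
          rw [hmod, htn, List.replicate_succ]
          simp
        · -- last partial batch: min bs r = r
          have hmin : min bs r = r := min_eq_right (by omega)
          simp only [hpos, hmin, dif_pos]
          rw [batchLoopA]
          have hdiv : r / bs = 0 := Int.ediv_eq_zero_of_lt (by omega) (by omega)
          have hmod : r % bs = r := Int.emod_eq_of_lt (by omega) (by omega)
          simp [hdiv, hmod, (show r ≠ 0 by omega)]
      · have : r = 0 := by omega
        subst this
        rw [batchLoopA]
        simp

theorem batch_sizes_py_spec : Claim_equal_batch_sizes_py := by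
  intro total bs _ hpre
  unfold Spec_batch_sizes_py batch_sizes_py batch_sizes_py_alt
  by_cases ht : total ≤ 0
  · rw [batchLoopA]
    simp [ht, not_lt.mpr ht]
  · have hbs : 1 ≤ bs := hpre.resolve_left ht
    have hbs0 : bs ≠ 0 := by omega
    rw [batchLoopA_closed bs hbs total.toNat total (by omega) (by omega) []]
    simp [PySem.Int.divmod?, hbs0, Int.fdiv_eq_ediv_of_nonneg _ (by omega : (0:Int) ≤ bs),
          Int.fmod_eq_emod_of_nonneg _ (by omega : (0:Int) ≤ bs), ht]
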